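-- pv_equiv track=rewrite | github.com/qzx997/klynx_skills | skills/circuit-design-ngspice/scripts/strict_param_check.py | source_numeric_tokens
-- ===== SOURCE A (Python) =====
-- SOURCE_KEYWORDS = {"dc", "ac", "pulse", "sin", "exp", "pwl", "sffm", "am"}
--
-- def source_numeric_tokens(value: str) -> list[str]:
--     text = value.strip()
--     if not text:
--         return []
--     parts = text.replace("(", " ").replace(")", " ").replace(",", " ").split()
--     out: list[str] = []
--     i = 0
--     while i < len(parts):
--         cur = parts[i]
--         if cur.lower() in {"dc", "ac"} and i + 1 < len(parts):
--             out.append(parts[i + 1])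
--             i += 2
--             continue
--         if cur.lower() in SOURCE_KEYWORDS:
--             i += 1
--             continue
--         out.append(cur)
--         i += 1
--     return out
-- ===== SOURCE B (Python) =====
-- SOURCE_KEYWORDS = {"dc", "ac", "pulse", "sin", "exp", "pwl", "sffm", "am"}
--
-- def source_numeric_tokens(value: str) -> list[str]:
--     text = value.strip()
--     if not text:
--         return []
--     parts = text.replace("(", " ").replace(")", " ").replace(",", " ").split()
--     # stage 1: run[i] = length of the maximal block of consecutive dc/ac tokens
--     # immediately preceding position i
--     run = [0] * len(parts)
--     for i in range(1, len(parts)):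
--         run[i] = run[i - 1] + 1 if parts[i - 1].lower() in ("dc", "ac") else 0
--     # stage 2: stateless filter: keep a token iff it sits an odd distance into a
--     # dc/ac block (it is a consumed value argument) or it is not a keyword
--     return [t for i, t in enumerate(parts)
--             if run[i] % 2 == 1 or t.lower() not in SOURCE_KEYWORDS]
-- ===== Notes on version B (the rewrite author's own statement) =====
-- stated objective: alternative
-- what changed: Replaces the stateful index loop with i+1 lookahead by a two-stage stateless pipeline: first compute, per token, the length of the run of consecutive dc/ac tokens immediately before it, then filter tokens by the parity of that run count (odd = consumed value argument, kept) or by not being a keyword.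
import Mathlib
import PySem

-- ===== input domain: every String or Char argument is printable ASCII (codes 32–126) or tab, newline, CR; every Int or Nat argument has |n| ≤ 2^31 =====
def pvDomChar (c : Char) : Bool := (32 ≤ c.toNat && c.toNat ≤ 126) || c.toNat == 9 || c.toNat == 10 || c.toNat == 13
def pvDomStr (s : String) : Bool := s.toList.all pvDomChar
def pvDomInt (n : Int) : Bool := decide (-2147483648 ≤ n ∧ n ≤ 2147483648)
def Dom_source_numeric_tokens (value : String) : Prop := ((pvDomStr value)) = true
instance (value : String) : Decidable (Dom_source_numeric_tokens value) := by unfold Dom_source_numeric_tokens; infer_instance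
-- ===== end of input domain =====

-- Header: B replaces A's stateful index loop (i+1 lookahead) by a two-stage pipeline —
-- a run-length array of consecutive preceding dc/ac tokens, then a stateless parity filter; objective: alternative.
-- ===== PORT A =====
def SOURCE_KEYWORDS : List String := ["dc", "ac", "pulse", "sin", "exp", "pwl", "sffm", "am"]

-- while loop over index i, transliterated as recursion on the remaining suffix parts[i:];
-- 'i + 1 < len(parts)' is 'the suffix has a second element'
def snt_loopA : List String → List String
  | [] => []
  | cur :: rest =>
    match rest with
    | nxt :: rest' =>
      if PySem.Str.lower cur = "dc" ∨ PySem.Str.lower cur = "ac" then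
        nxt :: snt_loopA rest'
      else if PySem.Str.lower cur ∈ SOURCE_KEYWORDS then
        snt_loopA (nxt :: rest')
      else
        cur :: snt_loopA (nxt :: rest')
    | [] =>
      if PySem.Str.lower cur = "dc" ∨ PySem.Str.lower cur = "ac" then []
      else if PySem.Str.lower cur ∈ SOURCE_KEYWORDS then []
      else [cur]

def source_numeric_tokens (value : String) : List String :=
  let text := PySem.Str.strip value
  if text = "" then []
  else
    let parts := PySem.Str.split₀ (PySem.Str.replace (PySem.Str.replace (PySem.Str.replace text "(" " ") ")" " ") "," " ")
    snt_loopA parts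

-- ===== PORT B =====
-- stage 1 of Source B: the run-length array; carries the running count r (run[i-1] updated by parts[i-1])
def snt_runs (r : Nat) : List String → List Nat
  | [] => []
  | t :: rest =>
      r :: snt_runs (if PySem.Str.lower t = "dc" ∨ PySem.Str.lower t = "ac" then r + 1 else 0) rest

def source_numeric_tokens_alt (value : String) : List String :=
  let text := PySem.Str.strip value
  if text = "" then []
  else
    let parts := PySem.Str.split₀ (PySem.Str.replace (PySem.Str.replace (PySem.Str.replace text "(" " ") ")" " ") "," " ")
    -- stage 2 of Source B: the stateless parity filter over (token, run) pairs
    ((parts.zip (snt_runs 0 parts)).filter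
      (fun p => p.2 % 2 == 1 || !(SOURCE_KEYWORDS.contains (PySem.Str.lower p.1)))).map Prod.fst

-- ===== PRECONDITION & SPEC =====
def Spec_source_numeric_tokens (value : String) (out : List String) : Prop := out = source_numeric_tokens_alt value
instance (value : String) (out : List String) : Decidable (Spec_source_numeric_tokens value out) := by unfold Spec_source_numeric_tokens; infer_instance

-- ===== CLAIM (what is proved, stated in full; the proofs are below) =====
def Claim_equal_source_numeric_tokens : Prop := ∀ (value : String), Dom_source_numeric_tokens value → Spec_source_numeric_tokens value (source_numeric_tokens value)

-- ===== LEMMAS AND PROOFS =====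

-- dc/ac are keywords
lemma snt_dcac_kw {t : String} (h : PySem.Str.lower t = "dc" ∨ PySem.Str.lower t = "ac") :
    PySem.Str.lower t ∈ SOURCE_KEYWORDS := by
  rcases h with h | h <;> simp [SOURCE_KEYWORDS, h]

lemma snt_runs_cons (r : Nat) (t : String) (rest : List String) :
    snt_runs r (t :: rest)
      = r :: snt_runs (if PySem.Str.lower t = "dc" ∨ PySem.Str.lower t = "ac" then r + 1 else 0) rest := rfl

-- B's filter condition at a keyword token with even run count is false
lemma snt_cond_kw {r : Nat} {t : String} (hr : r % 2 = 0) (hkw : PySem.Str.lower t ∈ SOURCE_KEYWORDS) :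
    (r % 2 == 1 || !(SOURCE_KEYWORDS.contains (PySem.Str.lower t))) = false := by
  simp [hkw]; omega

-- … at a non-keyword token it is true
lemma snt_cond_notkw {r : Nat} {t : String} (h2 : PySem.Str.lower t ∉ SOURCE_KEYWORDS) :
    (r % 2 == 1 || !(SOURCE_KEYWORDS.contains (PySem.Str.lower t))) = true := by
  simp [h2]

-- … and at any token with odd run count it is true
lemma snt_cond_odd {r : Nat} {t : String} (hr : r % 2 = 1) :
    (r % 2 == 1 || !(SOURCE_KEYWORDS.contains (PySem.Str.lower t))) = true := by
  simp [hr]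

-- main invariant: starting from any even running count, B's two stages reproduce A's loop
lemma snt_stages_even (parts : List String) :
    ∀ r : Nat, r % 2 = 0 →
      ((parts.zip (snt_runs r parts)).filter
        (fun p => p.2 % 2 == 1 || !(SOURCE_KEYWORDS.contains (PySem.Str.lower p.1)))).map Prod.fst
      = snt_loopA parts := by
  induction parts using snt_loopA.induct with
  | case1 => intro r _; simp [snt_runs, snt_loopA]
  | case2 cur nxt rest' h ih =>
    intro r hr
    rw [show snt_runs r (cur :: nxt :: rest')
          = r :: (r + 1) :: snt_runs (if PySem.Str.lower nxt = "dc" ∨ PySem.Str.lower nxt = "ac" then r + 2 else 0) rest' from by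
        rw [snt_runs_cons, if_pos h, snt_runs_cons]]
    rw [List.zip_cons_cons, List.zip_cons_cons, List.filter_cons, List.filter_cons]
    rw [if_neg (by simpa using snt_cond_kw hr (snt_dcac_kw h))]
    rw [if_pos (by simpa using snt_cond_odd (t := nxt) (show (r+1) % 2 = 1 by omega))]
    rw [List.map_cons]
    have htail :
        ((rest'.zip (snt_runs (if PySem.Str.lower nxt = "dc" ∨ PySem.Str.lower nxt = "ac" then r + 2 else 0) rest')).filter
          (fun p => p.2 % 2 == 1 || !(SOURCE_KEYWORDS.contains (PySem.Str.lower p.1)))).map Prod.fst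
        = snt_loopA rest' := by
      by_cases hn : PySem.Str.lower nxt = "dc" ∨ PySem.Str.lower nxt = "ac"
      · rw [if_pos hn]; exact ih (r + 2) (by omega)
      · rw [if_neg hn]; exact ih 0 rfl
    rw [htail]
    simp [snt_loopA, h]
  | case3 cur nxt rest' h1 h2 ih =>
    intro r hr
    rw [show snt_runs r (cur :: nxt :: rest') = r :: snt_runs 0 (nxt :: rest') from by
        rw [snt_runs_cons, if_neg h1]]
    rw [List.zip_cons_cons, List.filter_cons]
    rw [if_neg (by simpa using snt_cond_kw hr h2)]
    rw [ih 0 rfl]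
    simp [snt_loopA, h1, h2]
  | case4 cur nxt rest' h1 h2 ih =>
    intro r hr
    rw [show snt_runs r (cur :: nxt :: rest') = r :: snt_runs 0 (nxt :: rest') from by
        rw [snt_runs_cons, if_neg h1]]
    rw [List.zip_cons_cons, List.filter_cons]
    rw [if_pos (by simpa using snt_cond_notkw (r := r) h2)]
    rw [List.map_cons, ih 0 rfl]
    simp [snt_loopA, h1, h2]
  | case5 cur h =>
    intro r hr
    rw [snt_runs_cons, List.zip_cons_cons, List.filter_cons]
    rw [if_neg (by simpa using snt_cond_kw hr (snt_dcac_kw h))]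
    simp [snt_loopA, h]
  | case6 cur h1 h2 =>
    intro r hr
    rw [snt_runs_cons, List.zip_cons_cons, List.filter_cons]
    rw [if_neg (by simpa using snt_cond_kw hr h2)]
    simp [snt_loopA, h1, h2]
  | case7 cur h1 h2 =>
    intro r hr
    rw [snt_runs_cons, List.zip_cons_cons, List.filter_cons]
    rw [if_pos (by simpa using snt_cond_notkw (r := r) h2)]
    simp [snt_loopA, h1, h2]

-- ===== VERDICT (by name: the statement is the Claim_ definition above) =====
theorem source_numeric_tokens_spec : Claim_equal_source_numeric_tokens := by
  intro value _
  unfold Spec_source_numeric_tokens source_numeric_tokens source_numeric_tokens_alt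
  by_cases h : PySem.Str.strip value = ""
  · simp [h]
  · simp only [if_neg h]
    exact (snt_stages_even _ 0 rfl).symm
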